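-- pv_equiv track=rewrite | github.com/rafaaga/Judges | Python/UVA-714.py | solve
-- ===== SOURCE A (Python) =====
-- def f(x, k, A):
--     ans, ac, i = 1, 0, 0
--     while i < len(A) and ans <= k:
--         if ac + A[i] <= x:
--          ac += A[i]
--         else:
--             ans += 1
--             ac = A[i]
--         i += 1
--     return ans
--
-- def solve(books, k):
--     l, r = max(books), sum(books)
--     while l < r:
--         mid = l + ((r-l)>>1)
--         if f(mid, k, books) <= k:
--             r = mid
--         else:
--             l = mid + 1
--     return l
-- ===== SOURCE B (Python) =====
-- def solve(books, k):
--     # Number of greedy segments of `books` under `cap`: walk the list once,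
--     # opening a new segment whenever the running sum would exceed the cap.
--     def parts(cap):
--         n, run = 1, 0
--         for a in books:
--             if run + a > cap:
--                 n, run = n + 1, a
--             else:
--                 run += a
--         return n
--
--     # Recursive bisection of the answer interval [lo, hi].
--     def search(lo, hi):
--         if lo >= hi:
--             return lo
--         mid = (lo + hi) // 2
--         return search(lo, mid) if parts(mid) <= k else search(mid + 1, hi)
--
--     return search(max(books), sum(books))
-- ===== Notes on version B (the rewrite author's own statement) =====
-- stated objective: alternative
-- what changed: Same search-on-answer scheme (forced: the greedy segment count is non-monotone on lists with negative entries, so A's value is defined by the bisection path itself and no other search or DP is exact) but a different decomposition throughout: the stateful early-exit counter f(ans,ac,i) becomes a single-pass cut-counting fold with no index and no early exit, and the iterative l/r narrowing while-loop becomes structural recursion on the interval with a (lo+hi)//2 midpoint.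
import Mathlib
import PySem

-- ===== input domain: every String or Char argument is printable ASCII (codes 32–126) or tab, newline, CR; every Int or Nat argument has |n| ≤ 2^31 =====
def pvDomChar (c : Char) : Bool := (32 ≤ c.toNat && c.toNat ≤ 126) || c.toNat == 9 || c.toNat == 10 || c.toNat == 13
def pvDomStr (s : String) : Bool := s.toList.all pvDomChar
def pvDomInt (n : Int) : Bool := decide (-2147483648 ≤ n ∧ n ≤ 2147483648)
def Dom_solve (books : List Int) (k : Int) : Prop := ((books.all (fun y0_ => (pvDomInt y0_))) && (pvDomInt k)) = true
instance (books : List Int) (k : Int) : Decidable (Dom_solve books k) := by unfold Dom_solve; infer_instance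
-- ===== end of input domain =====

-- B re-decomposes A's search-on-answer: recursive bisection + a cut-counting fold
-- replacing the stateful early-exit counter f.  (A raises ValueError on [], excluded by Pre_.)

-- ===== PORT A =====
-- A's helper f: while i < len(A) and ans <= k, walking A by index with state (ans, ac).
def fA (x k : Int) : List Int → Int → Int → Int
  | [], ans, _ => ans
  | a :: rest, ans, ac =>
    if ans ≤ k then
      if ac + a ≤ x then fA x k rest ans (ac + a)
      else fA x k rest (ans + 1) a
    else ans

-- A's binary-search loop: while l < r, mid = l + ((r-l)>>1) (>>> 1 is Python's >> 1).
def loopA (books : List Int) (k : Int) (l r : Int) : Int :=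
  if l < r then
    let mid := l + ((r - l) >>> (1 : Nat))
    if fA mid k books 1 0 ≤ k then loopA books k l mid
    else loopA books k (mid + 1) r
  else l
termination_by (r - l).toNat
decreasing_by
  all_goals simp only [Int.shiftRight_eq_div_pow, pow_one]; omega

-- max(books) raises on []; Pre_ excludes that, the port reads the default 0 there.
def solve (books : List Int) (k : Int) : Int :=
  loopA books k ((PySem.List.max? books (fun v => v)).getD 0) books.sum

-- ===== PORT B =====
-- B's parts(cap): one fold over books with state (n, run), a cut whenever run + a > cap.
def partsB (books : List Int) (cap : Int) : Int :=
  (books.foldl (fun (st : Int × Int) a =>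
      if st.2 + a > cap then (st.1 + 1, a) else (st.1, st.2 + a)) (1, 0)).1

-- B's search(lo, hi): structural recursion on the interval, midpoint (lo+hi)//2.
def searchB (books : List Int) (k : Int) (lo hi : Int) : Int :=
  if lo ≥ hi then lo
  else
    let mid := PySem.Int.floordiv (lo + hi) 2
    if partsB books mid ≤ k then searchB books k lo mid
    else searchB books k (mid + 1) hi
termination_by (hi - lo).toNat
decreasing_by
  all_goals rw [PySem.Int.floordiv_eq_ediv_of_pos (show (0:Int) < 2 by omega)]; omega

def solve_alt (books : List Int) (k : Int) : Int :=
  searchB books k ((PySem.List.max? books (fun v => v)).getD 0) books.sum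

-- ===== PRECONDITION & SPEC =====
-- Pre_ excludes exactly the empty list, on which Python A raises ValueError (max([])).
def Pre_solve (books : List Int) (k : Int) : Prop := books ≠ []
instance (books : List Int) (k : Int) : Decidable (Pre_solve books k) := by unfold Pre_solve; infer_instance
def pvWitness_solve : List Int × Int := ([1, 2, 3], 2)

def Spec_solve (books : List Int) (k : Int) (out : Int) : Prop := out = solve_alt books k
instance (books : List Int) (k : Int) (out : Int) : Decidable (Spec_solve books k out) := by unfold Spec_solve; infer_instance

-- ===== CLAIM (what is proved, stated in full; the proofs are below) =====
def Claim_equal_solve : Prop := ∀ (books : List Int) (k : Int), Dom_solve books k → Pre_solve books k → Spec_solve books k (solve books k)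

-- ===== LEMMAS AND PROOFS =====

-- The exit-free count that both sides reduce to.
def gfull (x : Int) : List Int → Int → Int → Int
  | [], ans, _ => ans
  | a :: rest, ans, ac =>
    if ac + a ≤ x then gfull x rest ans (ac + a)
    else gfull x rest (ans + 1) a

theorem gfull_ge (x : Int) (l : List Int) (ans ac : Int) : ans ≤ gfull x l ans ac := by
  induction l generalizing ans ac with
  | nil => simp [gfull]
  | cons a rest ih =>
    simp only [gfull]
    split
    · exact ih ans (ac + a)
    · exact le_trans (by omega) (ih (ans + 1) a)

theorem fA_le_iff (x k : Int) (l : List Int) (ans ac : Int) :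
    (fA x k l ans ac ≤ k ↔ gfull x l ans ac ≤ k) := by
  induction l generalizing ans ac with
  | nil => simp [fA, gfull]
  | cons a rest ih =>
    by_cases h : ans ≤ k
    · simp only [fA, gfull, if_pos h]
      split
      · exact ih ans (ac + a)
      · exact ih (ans + 1) a
    · simp only [fA, if_neg h]
      constructor
      · intro hc; exact absurd hc h
      · intro hc
        exact absurd (le_trans (gfull_ge x (a :: rest) ans ac) hc) h

theorem partsB_foldl (x : Int) (l : List Int) (ans ac : Int) :
    (l.foldl (fun (st : Int × Int) a =>
        if st.2 + a > x then (st.1 + 1, a) else (st.1, st.2 + a)) (ans, ac)).1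
      = gfull x l ans ac := by
  induction l generalizing ans ac with
  | nil => simp [gfull]
  | cons a rest ih =>
    simp only [List.foldl, gfull]
    by_cases h : ac + a ≤ x
    · rw [if_neg (by omega), if_pos h]; exact ih ans (ac + a)
    · rw [if_pos (by omega), if_neg h]; exact ih (ans + 1) a

theorem pred_eq (books : List Int) (x k : Int) :
    (fA x k books 1 0 ≤ k) ↔ (partsB books x ≤ k) := by
  rw [fA_le_iff]; unfold partsB; rw [partsB_foldl]

theorem mid_eq (l r : Int) (h : l < r) :
    l + ((r - l) >>> (1 : Nat)) = PySem.Int.floordiv (l + r) 2 := by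
  rw [PySem.Int.floordiv_eq_ediv_of_pos (show (0:Int) < 2 by omega)]
  simp only [Int.shiftRight_eq_div_pow, pow_one]
  omega

theorem loop_eq (books : List Int) (k : Int) (l r : Int) :
    loopA books k l r = searchB books k l r := by
  rw [loopA, searchB]
  by_cases h : l < r
  · rw [if_pos h, if_neg (show ¬ l ≥ r by omega)]
    simp only [mid_eq l r h]
    by_cases hp : partsB books (PySem.Int.floordiv (l + r) 2) ≤ k
    · rw [if_pos ((pred_eq _ _ _).mpr hp), if_pos hp]
      exact loop_eq books k l _
    · rw [if_neg (fun hc => hp ((pred_eq _ _ _).mp hc)), if_neg hp]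
      exact loop_eq books k _ r
  · rw [if_neg h, if_pos (show l ≥ r by omega)]
termination_by (r - l).toNat
decreasing_by
  all_goals rw [PySem.Int.floordiv_eq_ediv_of_pos (show (0:Int) < 2 by omega)]; omega

-- ===== VERDICT (by name: the statement is the Claim_ definition above) =====
theorem solve_spec : Claim_equal_solve := by
  intro books k _ _
  unfold Spec_solve solve solve_alt
  exact loop_eq books k _ _
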